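-- pv_equiv track=rewrite | github.com/kaihaoma/APT | figure7/plot.py | rerange_by_key
-- ===== SOURCE A (Python) =====
-- def rerange_by_key(input, key_list=["papers", "friendster", "igbfull"]):
--     output = []
--     for key in key_list:
--         for element in input:
--             if key in element:
--                 output.append(element)
--                 break
--     return output
-- ===== SOURCE B (Python) =====
-- def rerange_by_key(input, key_list=["papers", "friendster", "igbfull"]):
--     found = {}
--     missing = dict.fromkeys(key_list)
--     for element in input:
--         if not missing:
--             break
--         matched = [key for key in missing if key in element]
--         for key in matched:
--             found[key] = element
--             del missing[key]
--     return [found[key] for key in key_list if key in found]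
-- ===== Notes on version B (the rewrite author's own statement) =====
-- stated objective: alternative
-- what changed: B makes a single pass over input, maintaining an ordered set of still-missing keys and a dict mapping each key to the first element containing it (breaking once no key is missing), then emits found[key] per key in key_list order, instead of A's one full scan of input per key.
import Mathlib
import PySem

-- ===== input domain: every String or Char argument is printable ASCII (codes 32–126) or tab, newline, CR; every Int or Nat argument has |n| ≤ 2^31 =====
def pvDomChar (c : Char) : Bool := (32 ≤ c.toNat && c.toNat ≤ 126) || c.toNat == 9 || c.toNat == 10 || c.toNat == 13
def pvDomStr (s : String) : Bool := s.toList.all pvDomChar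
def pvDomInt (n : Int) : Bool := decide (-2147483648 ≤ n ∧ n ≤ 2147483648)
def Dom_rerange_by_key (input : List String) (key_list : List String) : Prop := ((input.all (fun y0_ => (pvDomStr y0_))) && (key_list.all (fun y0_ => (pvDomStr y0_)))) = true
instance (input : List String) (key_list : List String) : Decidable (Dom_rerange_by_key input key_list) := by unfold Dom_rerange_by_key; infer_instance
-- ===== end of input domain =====

-- B builds a key→first-matching-element dict in one pass over input instead of A's per-key rescans; alternative decomposition, same results.


-- ===== PORT A =====
-- A's inner loop 'for element in input: if key in element: output.append(element); break'
def pvFindFirst (input : List String) (key : String) : Option String :=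
  match input with
  | [] => none
  | e :: rest => if PySem.Str.isIn key e then some e else pvFindFirst rest key

def rerange_by_key (input : List String) (key_list : List String) : List String :=
  key_list.foldl (fun output key =>
    match pvFindFirst input key with
    | some e => output ++ [e]
    | none => output) []

-- ===== PORT B =====
-- B: one pass over input; `missing` is the ordered set of still-unmatched keys (dict.fromkeys(key_list), ported as its
-- ordered-dedup key list, del = List.erase); each element binds the missing keys it contains, the loop breaks when
-- nothing is missing; then the comprehension [found[key] for key in key_list if key in found]
def pvScanLoop (found : PySem.Dict String String) (missing : List String) (xs : List String) : PySem.Dict String String :=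
  match xs with
  | [] => found
  | e :: rest =>
    if missing.isEmpty then found
    else
      let matched := missing.filter (fun key => PySem.Str.isIn key e)
      let p := matched.foldl (fun (p : PySem.Dict String String × List String) key =>
        (p.1.insert key e, p.2.erase key)) (found, missing)
      pvScanLoop p.1 p.2 rest

def rerange_by_key_alt (input : List String) (key_list : List String) : List String :=
  let found := pvScanLoop PySem.Dict.empty (PySem.Set.ofList key_list) input
  key_list.filterMap (fun key => found.get? key)

-- ===== PRECONDITION & SPEC =====
def Spec_rerange_by_key (input : List String) (key_list : List String) (out : List String) : Prop := out = rerange_by_key_alt input key_list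
instance (input : List String) (key_list : List String) (out : List String) : Decidable (Spec_rerange_by_key input key_list out) := by unfold Spec_rerange_by_key; infer_instance

-- ===== CLAIM (what is proved, stated in full; the proofs are below) =====
def Claim_equal_rerange_by_key : Prop := ∀ (input : List String) (key_list : List String), Dom_rerange_by_key input key_list → Spec_rerange_by_key input key_list (rerange_by_key input key_list)

-- ===== LEMMAS AND PROOFS =====

-- the pair-state inner loop, projected: the dict side is a fold of inserts …
theorem fst_scan_elem (matched : List String) (e : String) (d : PySem.Dict String String) (m : List String) :
    (matched.foldl (fun (p : PySem.Dict String String × List String) key =>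
      (p.1.insert key e, p.2.erase key)) (d, m)).1
    = matched.foldl (fun d key => d.insert key e) d := by
  induction matched generalizing d m with
  | nil => rfl
  | cons x xs ih => rw [List.foldl_cons, List.foldl_cons]; exact ih _ _

-- … and the list side is a fold of erases
theorem snd_scan_elem (matched : List String) (e : String) (d : PySem.Dict String String) (m : List String) :
    (matched.foldl (fun (p : PySem.Dict String String × List String) key =>
      (p.1.insert key e, p.2.erase key)) (d, m)).2
    = matched.foldl List.erase m := by
  induction matched generalizing d m with
  | nil => rfl
  | cons x xs ih => rw [List.foldl_cons, List.foldl_cons]; exact ih _ _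

-- lookups after inserting e at every matched key
theorem get?_insert_fold (matched : List String) (e : String) (d : PySem.Dict String String) (k : String) :
    (matched.foldl (fun d key => d.insert key e) d).get? k
    = if k ∈ matched then some e else d.get? k := by
  induction matched generalizing d with
  | nil =>
    rw [List.foldl_nil, if_neg List.not_mem_nil]
  | cons x xs ih =>
    rw [List.foldl_cons, ih]
    by_cases hm : k ∈ xs
    · rw [if_pos hm, if_pos (List.mem_cons_of_mem x hm)]
    · rw [if_neg hm]
      by_cases hk : k = x
      · subst hk
        rw [PySem.Dict.get?_insert_self, if_pos List.mem_cons_self]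
      · rw [PySem.Dict.get?_insert_of_ne d e hk, if_neg]
        intro h
        rcases List.mem_cons.mp h with h | h
        · exact hk h
        · exact hm h

-- erasing each element of a list from a duplicate-free list is a filter
theorem foldl_erase_eq_filter (l : List String) (m : List String) (hnd : m.Nodup) :
    l.foldl List.erase m = m.filter (fun k => decide (k ∉ l)) := by
  induction l generalizing m with
  | nil => simp
  | cons x xs ih =>
    rw [List.foldl_cons, ih (m.erase x) (hnd.erase x), hnd.erase_eq_filter x,
      List.filter_filter]
    apply List.filter_congr
    intro a _
    by_cases hax : a = x
    · subst hax; simp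
    · simp [hax]

-- the scanning loop binds k to the first element containing it, provided `missing` tracks exactly the unbound state of k
theorem scan_get? (xs : List String) (found : PySem.Dict String String) (missing : List String) (k : String)
    (hnd : missing.Nodup) (hinv : k ∈ missing ↔ found.get? k = none) :
    (pvScanLoop found missing xs).get? k = (found.get? k).or (pvFindFirst xs k) := by
  induction xs generalizing found missing with
  | nil =>
    unfold pvScanLoop pvFindFirst
    cases found.get? k <;> rfl
  | cons e rest ih =>
    rw [pvScanLoop]
    by_cases hemp : missing.isEmpty = true
    · rw [if_pos hemp]
      have hk : found.get? k ≠ none := fun h =>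
        (List.isEmpty_iff.mp hemp ▸ hinv.mpr h : k ∈ ([] : List String)) |> List.not_mem_nil
      rcases Option.ne_none_iff_exists'.mp hk with ⟨v, hv⟩
      rw [hv, Option.some_or]
    · rw [if_neg hemp]
      have hmatched : ∀ j, j ∈ missing.filter (fun key => PySem.Str.isIn key e)
          ↔ j ∈ missing ∧ PySem.Str.isIn j e = true := by
        intro j; rw [List.mem_filter]
      have hfst := fst_scan_elem (missing.filter (fun key => PySem.Str.isIn key e)) e found missing
      have hsnd := snd_scan_elem (missing.filter (fun key => PySem.Str.isIn key e)) e found missing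
      have herase := foldl_erase_eq_filter (missing.filter (fun key => PySem.Str.isIn key e)) missing hnd
      show (pvScanLoop
          ((missing.filter (fun key => PySem.Str.isIn key e)).foldl
            (fun (p : PySem.Dict String String × List String) key => (p.1.insert key e, p.2.erase key)) (found, missing)).1
          ((missing.filter (fun key => PySem.Str.isIn key e)).foldl
            (fun (p : PySem.Dict String String × List String) key => (p.1.insert key e, p.2.erase key)) (found, missing)).2
          rest).get? k = _
      rw [hfst, hsnd, herase]
      rw [ih _ _ (hnd.filter _) (by
        rw [get?_insert_fold]
        by_cases hb : k ∈ missing.filter (fun key => PySem.Str.isIn key e)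
        · rw [if_pos hb]
          constructor
          · intro h
            exact absurd (of_decide_eq_true (List.mem_filter.mp h).2) (fun hn => hn hb)
          · intro h; exact absurd h (Option.some_ne_none e)
        · rw [if_neg hb, ← hinv]
          constructor
          · intro h; exact (List.mem_filter.mp h).1
          · intro h1; exact List.mem_filter.mpr ⟨h1, decide_eq_true hb⟩)]
      rw [get?_insert_fold]
      by_cases hb : k ∈ missing.filter (fun key => PySem.Str.isIn key e)
      · rcases (hmatched k).mp hb with ⟨hm, hin⟩
        rw [if_pos hb, Option.some_or, hinv.mp hm, Option.none_or]
        unfold pvFindFirst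
        rw [if_pos hin]
      · rw [if_neg hb]
        by_cases hd : found.get? k = none
        · have hm : k ∈ missing := hinv.mpr hd
          have hin : ¬ PySem.Str.isIn k e = true := fun h => hb ((hmatched k).mpr ⟨hm, h⟩)
          rw [hd, Option.none_or, Option.none_or]
          unfold pvFindFirst
          rw [if_neg hin]
          cases rest <;> rfl
        · rcases Option.ne_none_iff_exists'.mp hd with ⟨v, hv⟩
          rw [hv, Option.some_or, Option.some_or]

-- A's append-or-skip foldl is a filterMap
theorem foldl_append_eq_filterMap (keys : List String) (f : String → Option String) (acc : List String) :
    keys.foldl (fun output key => match f key with | some e => output ++ [e] | none => output) acc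
    = acc ++ keys.filterMap f := by
  induction keys generalizing acc with
  | nil => simp
  | cons x xs ih =>
    rw [List.foldl_cons, List.filterMap_cons]
    cases hfx : f x with
    | none => simpa using ih acc
    | some e => simpa using ih (acc ++ [e])

-- ===== VERDICT (by name: the statement is the Claim_ definition above) =====
theorem rerange_by_key_spec : Claim_equal_rerange_by_key := by
  intro input key_list _
  unfold Spec_rerange_by_key rerange_by_key rerange_by_key_alt
  rw [foldl_append_eq_filterMap, List.nil_append]
  apply List.filterMap_congr
  intro k hk
  rw [scan_get? input PySem.Dict.empty (PySem.Set.ofList key_list) k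
      (PySem.Set.nodup_ofList key_list)
      (by rw [PySem.Dict.get?_empty]; simp [PySem.Set.mem_ofList, hk]),
    PySem.Dict.get?_empty, Option.none_or]
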